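-- pv_equiv track=rewrite | github.com/QianyeYang/ViNo-rls | vino/cli/updateSoftware.py | is_version_number_valid
-- ===== SOURCE A (Python) =====
-- def is_version_number_valid(version_number: str) -> bool:
--     '''
--     Check if the version number is valid.
--
--     :param version_number: The version number to check.
--     :type version_number: str
--
--     :return: True if the version number is valid, False otherwise.
--     :rtype: bool
--     '''
--     numbers = version_number.split('.')
--     if len(numbers) != 3:
--         return False
--     for n in numbers:
--         if not n.isdigit():
--             return False
--     return True
-- ===== SOURCE B (Python) =====
-- def is_version_number_valid(version_number: str) -> bool:
--     '''Single-pass scan: count '.' separators and track whether the current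
--     segment has at least one (all-digit) character; no intermediate list.'''
--     dots = 0
--     seg = False
--     for c in version_number:
--         if c == '.':
--             if not seg:
--                 return False
--             if dots == 2:
--                 return False
--             dots += 1
--             seg = False
--         elif c.isdigit():
--             seg = True
--         else:
--             return False
--     return dots == 2 and seg
-- ===== Notes on version B (the rewrite author's own statement) =====
-- stated objective: alternative
-- what changed: Replaces split('.') into a list plus a second checking loop by a single character-by-character scan that maintains a dot count and a current-segment-nonempty flag, never materialising the parts.
import Mathlib
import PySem

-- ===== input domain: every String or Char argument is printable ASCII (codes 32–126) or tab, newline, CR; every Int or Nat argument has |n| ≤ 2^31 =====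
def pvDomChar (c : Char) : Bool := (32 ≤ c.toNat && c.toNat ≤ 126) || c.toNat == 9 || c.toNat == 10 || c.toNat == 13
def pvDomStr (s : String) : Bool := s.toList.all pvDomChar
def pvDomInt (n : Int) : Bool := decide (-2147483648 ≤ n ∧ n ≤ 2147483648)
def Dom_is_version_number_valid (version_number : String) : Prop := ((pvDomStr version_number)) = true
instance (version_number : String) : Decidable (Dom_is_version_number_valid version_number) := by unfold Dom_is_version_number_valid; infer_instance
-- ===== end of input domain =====

-- B replaces A's split-then-check-each-part pass by a single character scan with
-- a dot counter and a segment-nonempty flag (objective: alternative decomposition).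

-- ===== PORT A =====
-- A's for-loop "for n in numbers: if not n.isdigit(): return False; return True"
def pvALoop : List (List Char) → Bool
  | [] => true
  | n :: rest => if !(PySem.Chars.strIsdigit n) then false else pvALoop rest

def is_version_number_valid (version_number : String) : Bool :=
  let numbers := PySem.Chars.splitOn version_number.toList ['.']
  if numbers.length ≠ 3 then false
  else pvALoop numbers

-- ===== PORT B =====
-- B's scan: state = (dots seen, current segment nonempty); early returns become `false`.
def pvBScan : List Char → Nat → Bool → Bool
  | [], dots, seg => dots == 2 && seg
  | c :: rest, dots, seg =>
    if c == '.' then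
      if !seg then false
      else if dots == 2 then false
      else pvBScan rest (dots + 1) false
    else if PySem.Chars.isdigit c then pvBScan rest dots true
    else false

def is_version_number_valid_alt (version_number : String) : Bool :=
  pvBScan version_number.toList 0 false

-- ===== PRECONDITION & SPEC =====
def Spec_is_version_number_valid (version_number : String) (out : Bool) : Prop := out = is_version_number_valid_alt version_number
instance (version_number : String) (out : Bool) : Decidable (Spec_is_version_number_valid version_number out) := by unfold Spec_is_version_number_valid; infer_instance

-- ===== CLAIM (what is proved, stated in full; the proofs are below) =====
def Claim_equal_is_version_number_valid : Prop := ∀ (version_number : String), Dom_is_version_number_valid version_number → Spec_is_version_number_valid version_number (is_version_number_valid version_number)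

-- ===== LEMMAS AND PROOFS =====

-- reference split on '.' used only by the proofs
def pvSp : List Char → List (List Char)
  | [] => [[]]
  | c :: rest =>
    if c = '.' then [] :: pvSp rest
    else (c :: (pvSp rest).headI) :: (pvSp rest).tail

theorem pvSp_ne_nil (cs : List Char) : pvSp cs ≠ [] := by
  cases cs with
  | nil => simp [pvSp]
  | cons c rest => simp only [pvSp]; split <;> simp

-- helper: apply f to the head of a (nonempty) list
def pvMapHead (f : List Char → List Char) : List (List Char) → List (List Char)
  | [] => []
  | p :: ps => f p :: ps

theorem pvGo_eq (cs : List Char) : ∀ (fuel : Nat) (cur : List Char) (acc : List (List Char)),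
    cs.length ≤ fuel →
    PySem.Chars.splitOn.go ['.'] fuel cs cur acc
      = acc.reverse ++ pvMapHead (cur.reverse ++ ·) (pvSp cs) := by
  induction cs with
  | nil =>
    intro fuel cur acc _
    rw [PySem.Chars.splitOn.go.eq_def]
    cases fuel <;> simp [pvSp, pvMapHead]
  | cons c rest ih =>
    intro fuel cur acc hle
    cases fuel with
    | zero => simp at hle
    | succ f =>
      rw [PySem.Chars.splitOn.go.eq_def]
      simp only [List.isPrefixOf, List.isPrefixOf_nil_left, Bool.and_true,
        List.length_cons, List.length_nil, List.drop_succ_cons, List.drop_zero]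
      have hne := pvSp_ne_nil rest
      by_cases hc : c = '.'
      · subst hc
        simp only [beq_self_eq_true, if_true]
        rw [ih f [] (cur.reverse :: acc) (by simp at hle; omega)]
        cases hsp : pvSp rest with
        | nil => exact absurd hsp hne
        | cons p ps => simp [pvSp, hsp, pvMapHead]
      · rw [if_neg (by simp only [beq_iff_eq]; exact fun h => hc h.symm)]
        rw [ih f (c :: cur) acc (by simp at hle ⊢; omega)]
        cases hsp : pvSp rest with
        | nil => exact absurd hsp hne
        | cons p ps => simp [pvSp, hsp, pvMapHead, hc]

theorem pvSplitOn_eq (cs : List Char) : PySem.Chars.splitOn cs ['.'] = pvSp cs := by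
  have h := pvGo_eq cs (cs.length + 1) [] [] (Nat.le_succ _)
  cases hsp : pvSp cs with
  | nil => exact absurd hsp (pvSp_ne_nil cs)
  | cons p ps =>
    rw [PySem.Chars.splitOn, h, hsp]
    simp [pvMapHead]

theorem pvALoop_eq_all (l : List (List Char)) :
    pvALoop l = l.all PySem.Chars.strIsdigit := by
  induction l with
  | nil => rfl
  | cons n rest ih =>
    simp only [pvALoop, List.all_cons, ih]
    cases PySem.Chars.strIsdigit n <;> simp

-- the scan computes, in terms of the reference split, exactly A's condition
theorem pvBScan_eq (cs : List Char) : ∀ (dots : Nat) (seg : Bool), dots ≤ 2 →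
    pvBScan cs dots seg
      = (decide (dots + (pvSp cs).length = 3)
          && (seg || !(pvSp cs).headI.isEmpty)
          && (pvSp cs).headI.all PySem.Chars.isdigit
          && (pvSp cs).tail.all PySem.Chars.strIsdigit) := by
  induction cs with
  | nil =>
    intro dots seg _
    have hdec : (dots == 2) = decide (dots + ([([] : List Char)] : List (List Char)).length = 3) := by
      by_cases h : dots = 2 <;> simp [h] <;> omega
    simp only [pvBScan, pvSp, List.headI, List.tail, List.all_nil, hdec]
    cases seg <;> simp
  | cons c rest ih =>
    intro dots seg hd
    have hne := pvSp_ne_nil rest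
    cases hsp : pvSp rest with
    | nil => exact absurd hsp hne
    | cons p ps =>
      by_cases hc : c = '.'
      · subst hc
        simp only [pvBScan, beq_self_eq_true, if_true, pvSp, if_pos rfl, hsp]
        cases seg with
        | false => simp
        | true =>
          simp only [Bool.not_true, Bool.false_eq_true, if_neg, Bool.true_or,
            Bool.and_true, Bool.true_and]
          by_cases h2 : dots = 2
          · subst h2
            have hlen : decide (2 + ([] :: p :: ps : List (List Char)).length = 3) = false := by
              simp only [List.length_cons]; simp; omega
            simp [hlen]
            intros; omega
          · rw [ih (dots + 1) false (by omega), hsp]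
            have hdec : decide (dots + 1 + (p :: ps).length = 3)
                = decide (dots + ([] :: p :: ps : List (List Char)).length = 3) :=
              decide_eq_decide.mpr (by simp only [List.length_cons]; omega)
            simp only [List.headI_cons, List.tail_cons, List.all_cons, List.all_nil, hdec,
              Bool.false_or, Bool.true_or, PySem.Chars.strIsdigit, List.isEmpty_nil,
              Bool.not_true, Bool.and_true, Bool.true_and, Bool.and_assoc]
            simp [h2]
      · have hcb : (c == '.') = false := by simp [hc]
        simp only [pvBScan, hcb, Bool.false_eq_true, if_false, pvSp, if_neg hc, hsp]
        by_cases hdig : PySem.Chars.isdigit c = true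
        · rw [if_pos hdig, ih dots true hd, hsp]
          simp only [List.headI_cons, List.tail_cons, List.all_cons, List.length_cons,
            hdig, List.isEmpty_cons, Bool.not_false, Bool.or_true, Bool.true_or,
            Bool.and_true, Bool.true_and]
          rfl
        · rw [if_neg hdig]
          have hall : ((c :: p).all PySem.Chars.isdigit) = false := by
            simp only [List.all_cons, Bool.and_eq_false_iff]
            left; simpa using hdig
          simp [hall]

theorem is_version_number_valid_eq_alt (s : String) :
    is_version_number_valid s = is_version_number_valid_alt s := by
  unfold is_version_number_valid is_version_number_valid_alt
  rw [pvSplitOn_eq, pvBScan_eq s.toList 0 false (by omega)]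
  cases hsp : pvSp s.toList with
  | nil => exact absurd hsp (pvSp_ne_nil s.toList)
  | cons p ps =>
    simp only [List.headI, List.tail, Bool.false_or, Nat.zero_add, pvALoop_eq_all]
    by_cases h3 : (p :: ps : List (List Char)).length = 3
    · simp [h3, PySem.Chars.strIsdigit, Bool.and_assoc]
    · simp only [List.length_cons] at h3
      simp [show ps.length ≠ 2 from by omega]

-- ===== VERDICT (by name: the statement is the Claim_ definition above) =====
theorem is_version_number_valid_spec : Claim_equal_is_version_number_valid := by
  intro s _
  unfold Spec_is_version_number_valid
  exact is_version_number_valid_eq_alt s
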